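-- pv_equiv track=rewrite | github.com/rigyeonghong/algorithms_study | rigyeong/230301_pg_60059.py | is_correct_key
-- ===== SOURCE A (Python) =====
-- def is_correct_key(key, M, lock2, N, x, y):
--     # 확인용 lock3
--     lock3 = [[0 for y in range(N*3)] for x in range(N*3)]
--     for i in range(N, N+N):
--         for j in range(N, N+N):
--             lock3[i][j] = lock2[i][j]
--
--     for i in range(x, x+M):
--         for j in range(y, y+M):
--             lock3[i][j] += key[i-x][j-y]
--
--     for i in range(N, N+N):
--         for j in range(N, N+N):
--             if lock3[i][j] != 1:
--                 return False
--     return True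
-- ===== SOURCE B (Python) =====
-- def is_correct_key(key, M, lock2, N, x, y):
--     # Check the central N..2N-1 block directly, computing each cell's final
--     # value on the fly instead of materialising a 3N x 3N scratch grid.
--     for i in range(N, N + N):
--         for j in range(N, N + N):
--             v = lock2[i][j]
--             if x <= i < x + M and y <= j < y + M:
--                 v += key[i - x][j - y]
--             if v != 1:
--                 return False
--     return True
-- ===== Notes on version B (the rewrite author's own statement) =====
-- stated objective: simpler
-- what changed: B drops A's 3N x 3N scratch grid and its three loop nests (build, add, check): it walks only the central N..2N-1 block once and computes each cell's final value directly as lock2[i][j] plus the key contribution when the cell lies under the placed key.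
-- outside the precondition, e.g. on is_correct_key([[1]], 1, [[0, 0, 0], [0, 1, 0], [0, 0, 0]], 1, -2, -2): A returns False, B returns True
import Mathlib
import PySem

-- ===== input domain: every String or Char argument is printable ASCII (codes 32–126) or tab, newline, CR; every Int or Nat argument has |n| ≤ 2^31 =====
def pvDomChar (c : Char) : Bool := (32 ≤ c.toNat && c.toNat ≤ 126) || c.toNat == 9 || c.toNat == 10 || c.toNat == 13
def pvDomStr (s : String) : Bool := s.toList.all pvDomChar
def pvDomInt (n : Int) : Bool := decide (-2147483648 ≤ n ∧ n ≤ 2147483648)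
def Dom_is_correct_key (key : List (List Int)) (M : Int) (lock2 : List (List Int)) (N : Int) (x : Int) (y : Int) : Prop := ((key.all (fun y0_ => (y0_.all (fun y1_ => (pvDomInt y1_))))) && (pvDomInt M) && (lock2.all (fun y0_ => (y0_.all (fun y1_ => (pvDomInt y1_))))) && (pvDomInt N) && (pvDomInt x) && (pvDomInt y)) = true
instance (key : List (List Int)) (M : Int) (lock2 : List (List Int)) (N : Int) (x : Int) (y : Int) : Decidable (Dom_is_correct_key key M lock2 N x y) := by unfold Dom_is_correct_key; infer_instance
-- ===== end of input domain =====

-- B checks the central N..2N-1 block directly, computing each cell's final value on the fly,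
-- instead of building and mutating a 3N×3N scratch grid in three loop nests (objective: simpler).

-- Shared nested-list indexing helpers (Python m[i][j]). Reads go through PySem.List.pyGetD;
-- the write helper resolves its indices with toNat, exact for the non-negative in-range
-- indices Pre_ admits (Python's negative-index wraparound lies outside Pre_).
def pvGet2 (m : List (List Int)) (i j : Int) : Int :=
  PySem.List.pyGetD (PySem.List.pyGetD m i []) j 0

def pvSet2 (m : List (List Int)) (i j : Int) (v : Int) : List (List Int) :=
  m.set i.toNat ((m.getD i.toNat []).set j.toNat v)

-- ===== PORT A =====
def is_correct_key (key : List (List Int)) (M : Int) (lock2 : List (List Int)) (N : Int) (x : Int) (y : Int) : Bool :=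
  -- lock3 = [[0 for y in range(N*3)] for x in range(N*3)]
  let lock3 : List (List Int) :=
    (PySem.List.pyRange 0 (N*3) 1).map (fun _ => (PySem.List.pyRange 0 (N*3) 1).map (fun _ => (0:Int)))
  -- copy loop: lock3[i][j] = lock2[i][j]
  let lock3 :=
    (PySem.List.pyRange N (N+N) 1).foldl (fun m i =>
      (PySem.List.pyRange N (N+N) 1).foldl (fun m j =>
        pvSet2 m i j (pvGet2 lock2 i j)) m) lock3
  -- add loop: lock3[i][j] += key[i-x][j-y]
  let lock3 :=
    (PySem.List.pyRange x (x+M) 1).foldl (fun m i =>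
      (PySem.List.pyRange y (y+M) 1).foldl (fun m j =>
        pvSet2 m i j (pvGet2 m i j + pvGet2 key (i-x) (j-y))) m) lock3
  -- check loop with early `return False` = List.all
  (PySem.List.pyRange N (N+N) 1).all (fun i =>
    (PySem.List.pyRange N (N+N) 1).all (fun j => pvGet2 lock3 i j == 1))

-- ===== PORT B =====
def is_correct_key_alt (key : List (List Int)) (M : Int) (lock2 : List (List Int)) (N : Int) (x : Int) (y : Int) : Bool :=
  (PySem.List.pyRange N (N+N) 1).all (fun i =>
    (PySem.List.pyRange N (N+N) 1).all (fun j =>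
      (pvGet2 lock2 i j +
        (if x ≤ i ∧ i < x + M ∧ y ≤ j ∧ j < y + M then pvGet2 key (i-x) (j-y) else 0)) == 1))

-- ===== PRECONDITION & SPEC =====
-- Pre_ excludes exactly (a) the inputs where A raises IndexError (key placement reaching past
-- the 3N×3N grid, or key/lock2 rows too short for the cells actually read) and (b) placements
-- with a negative coordinate, outside the puzzle's natural domain of grid offsets, where A's
-- value arises from Python's negative-index wraparound writing the key onto other cells.
def Pre_is_correct_key (key : List (List Int)) (M : Int) (lock2 : List (List Int)) (N : Int) (x : Int) (y : Int) : Prop :=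
  (0 < M → 0 ≤ x ∧ 0 ≤ y ∧ x + M ≤ 3*N ∧ y + M ≤ 3*N ∧ M ≤ (key.length : Int) ∧
    ∀ r ∈ key.take M.toNat, M ≤ (r.length : Int)) ∧
  (0 < N → 2*N ≤ (lock2.length : Int) ∧
    ∀ r ∈ (lock2.take (2*N).toNat).drop N.toNat, 2*N ≤ (r.length : Int))

instance (key : List (List Int)) (M : Int) (lock2 : List (List Int)) (N : Int) (x : Int) (y : Int) : Decidable (Pre_is_correct_key key M lock2 N x y) := by unfold Pre_is_correct_key; infer_instance

def pvWitness_is_correct_key : List (List Int) × Int × List (List Int) × Int × Int × Int :=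
  ([[1]], 1, [[1,1,1],[1,1,1],[1,1,1]], 1, 1, 1)

def Spec_is_correct_key (key : List (List Int)) (M : Int) (lock2 : List (List Int)) (N : Int) (x : Int) (y : Int) (out : Bool) : Prop := out = is_correct_key_alt key M lock2 N x y
instance (key : List (List Int)) (M : Int) (lock2 : List (List Int)) (N : Int) (x : Int) (y : Int) (out : Bool) : Decidable (Spec_is_correct_key key M lock2 N x y out) := by unfold Spec_is_correct_key; infer_instance

-- ===== CLAIM (what is proved, stated in full; the proofs are below) =====
def Claim_equal_is_correct_key : Prop := ∀ (key : List (List Int)) (M : Int) (lock2 : List (List Int)) (N : Int) (x : Int) (y : Int), Dom_is_correct_key key M lock2 N x y → Pre_is_correct_key key M lock2 N x y → Spec_is_correct_key key M lock2 N x y (is_correct_key key M lock2 N x y)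

-- ===== LEMMAS AND PROOFS =====

-- uniform shape: a 3N×3N matrix
def pvSh (m : List (List Int)) (N : Int) : Prop :=
  (m.length : Int) = 3*N ∧ ∀ r ∈ m, (r.length : Int) = 3*N

lemma pvGet2_nonneg (m : List (List Int)) (i j : Int) (hi : 0 ≤ i) (hj : 0 ≤ j) :
    pvGet2 m i j = (m.getD i.toNat []).getD j.toNat 0 := by
  simp [pvGet2, PySem.List.pyGetD_of_nonneg _ _ hi, PySem.List.pyGetD_of_nonneg _ _ hj]

lemma pvRow_len {m : List (List Int)} {N i : Int} (hm : pvSh m N)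
    (hi : 0 ≤ i) (hiN : i < 3*N) : ((m.getD i.toNat []).length : Int) = 3*N := by
  have hL := hm.1
  have hlt : i.toNat < m.length := by omega
  have : m.getD i.toNat [] = m[i.toNat] := List.getD_eq_getElem m [] hlt
  rw [this]; exact hm.2 _ (List.getElem_mem hlt)

lemma pvSh_set2 {m : List (List Int)} {N : Int} (hm : pvSh m N)
    {i : Int} (hi : 0 ≤ i) (hiN : i < 3*N) (j v : Int) : pvSh (pvSet2 m i j v) N := by
  refine ⟨by simpa [pvSet2] using hm.1, ?_⟩
  intro r hr
  rcases List.mem_or_eq_of_mem_set hr with h | h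
  · exact hm.2 _ h
  · subst h; simpa using pvRow_len hm hi hiN

lemma pvGet2_set2 {m : List (List Int)} {N : Int} (hm : pvSh m N)
    {i j i' j' : Int} (v : Int) (hi : 0 ≤ i) (hiN : i < 3*N) (hj : 0 ≤ j) (hjN : j < 3*N)
    (hi' : 0 ≤ i') (hj' : 0 ≤ j') :
    pvGet2 (pvSet2 m i j v) i' j' = if i' = i ∧ j' = j then v else pvGet2 m i' j' := by
  have hL := hm.1
  have hiL : i.toNat < m.length := by omega
  have hjL : j.toNat < (m.getD i.toNat []).length := by
    have hr := pvRow_len hm hi hiN; omega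
  rw [pvGet2_nonneg _ _ _ hi' hj', pvGet2_nonneg _ _ _ hi' hj']
  unfold pvSet2
  by_cases h1 : i' = i
  · subst h1
    have e1 : (m.set i'.toNat ((m.getD i'.toNat []).set j.toNat v)).getD i'.toNat [] =
        (m.getD i'.toNat []).set j.toNat v := by
      simp [List.getD_eq_getElem?_getD, hiL]
    rw [e1]
    by_cases h2 : j' = j
    · subst h2
      rw [List.getD_eq_getElem?_getD] at hjL
      simp [List.getD_eq_getElem?_getD, hjL]
    · have hne : j.toNat ≠ j'.toNat := by omega
      simp [List.getD_eq_getElem?_getD, hne, h2]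
  · have hne : i.toNat ≠ i'.toNat := by omega
    simp [List.getD_eq_getElem?_getD, hne, h1]

lemma pvInner_fold (N : Int) (F : Int → Int → Int) {i : Int} (hi : 0 ≤ i) (hiN : i < 3*N) :
    ∀ (js : List Int), js.Nodup → (∀ j ∈ js, 0 ≤ j ∧ j < 3*N) →
    ∀ (m : List (List Int)), pvSh m N →
      pvSh (js.foldl (fun m j => pvSet2 m i j (F j (pvGet2 m i j))) m) N ∧
      ∀ i0 j0, 0 ≤ i0 → 0 ≤ j0 →
        pvGet2 (js.foldl (fun m j => pvSet2 m i j (F j (pvGet2 m i j))) m) i0 j0 =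
          if i0 = i ∧ j0 ∈ js then F j0 (pvGet2 m i0 j0) else pvGet2 m i0 j0 := by
  intro js
  induction js with
  | nil => intro _ _ m hm; simp [hm]
  | cons j js ih =>
    intro hnd hb m hm
    obtain ⟨hj0, hjN⟩ := hb j (by simp)
    have hm1 : pvSh (pvSet2 m i j (F j (pvGet2 m i j))) N := pvSh_set2 hm hi hiN _ _
    obtain ⟨ihSh, ihGet⟩ := ih hnd.of_cons (fun a ha => hb a (by simp [ha])) _ hm1
    refine ⟨by simpa using ihSh, ?_⟩
    intro i0 j0 hi0 hj0'
    have hset := pvGet2_set2 hm (F j (pvGet2 m i j)) hi hiN hj0 hjN hi0 hj0'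
    simp only [List.foldl_cons]
    rw [ihGet i0 j0 hi0 hj0']
    by_cases h1 : i0 = i
    · subst h1
      by_cases h2 : j0 ∈ js
      · have hjj : j0 ≠ j := by rintro rfl; exact (List.nodup_cons.mp hnd).1 h2
        rw [hset]
        simp [h2, hjj]
      · by_cases h3 : j0 = j
        · subst h3; rw [hset]; simp [h2]
        · rw [hset]; simp [h2, h3]
    · rw [hset]; simp [h1]

lemma pvOuter_fold (N : Int) (F : Int → Int → Int → Int) :
    ∀ (iss : List Int), iss.Nodup → (∀ i ∈ iss, 0 ≤ i ∧ i < 3*N) →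
    ∀ (js : List Int), js.Nodup → (∀ j ∈ js, 0 ≤ j ∧ j < 3*N) →
    ∀ (m : List (List Int)), pvSh m N →
      pvSh (iss.foldl (fun m i => js.foldl (fun m j => pvSet2 m i j (F i j (pvGet2 m i j))) m) m) N ∧
      ∀ i0 j0, 0 ≤ i0 → 0 ≤ j0 →
        pvGet2 (iss.foldl (fun m i => js.foldl (fun m j => pvSet2 m i j (F i j (pvGet2 m i j))) m) m) i0 j0 =
          if i0 ∈ iss ∧ j0 ∈ js then F i0 j0 (pvGet2 m i0 j0) else pvGet2 m i0 j0 := by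
  intro iss
  induction iss with
  | nil => intro _ _ js _ _ m hm; simp [hm]
  | cons i iss ih =>
    intro hnd hb js hndj hbj m hm
    obtain ⟨hi0, hiN⟩ := hb i (by simp)
    obtain ⟨innSh, innGet⟩ := pvInner_fold N (F i) hi0 hiN js hndj hbj m hm
    obtain ⟨ihSh, ihGet⟩ := ih hnd.of_cons (fun a ha => hb a (by simp [ha])) js hndj hbj _ innSh
    refine ⟨by simpa using ihSh, ?_⟩
    intro i0 j0 hi0' hj0'
    simp only [List.foldl_cons]
    rw [ihGet i0 j0 hi0' hj0', innGet i0 j0 hi0' hj0']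
    by_cases h1 : i0 = i
    · subst h1
      have hii : i0 ∉ iss := (List.nodup_cons.mp hnd).1
      by_cases h2 : j0 ∈ js
      · simp [h2, hii]
      · simp [h2, hii]
    · simp [h1]

lemma pvNodup_pyRange (a b : Int) : (PySem.List.pyRange a b 1).Nodup :=
  (PySem.List.pairwise_lt_pyRange_one a b).imp ne_of_lt

lemma pvAll_congr_mem {α : Type} (l : List α) (p q : α → Bool)
    (h : ∀ a ∈ l, p a = q a) : l.all p = l.all q := by
  induction l with
  | nil => rfl
  | cons a l ih => simp only [List.all_cons, h a (by simp), ih (fun b hb => h b (by simp [hb]))]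

-- ===== VERDICT (by name: the statement is the Claim_ definition above) =====
theorem is_correct_key_spec : Claim_equal_is_correct_key := by
  intro key M lock2 N x y _ hpre
  unfold Spec_is_correct_key is_correct_key is_correct_key_alt
  by_cases hN : 0 < N
  case neg =>
    rw [PySem.List.pyRange_one_eq_nil (by omega : N + N ≤ N)]
    simp
  case pos =>
  obtain ⟨hpk, hpl⟩ := hpre
  -- shape of the initial zero grid
  have h0 : pvSh ((PySem.List.pyRange 0 (N*3) 1).map
      (fun _ => (PySem.List.pyRange 0 (N*3) 1).map (fun _ => (0:Int)))) N := by
    constructor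
    · simp [PySem.List.length_pyRange_one]; omega
    · intro r hr
      rcases List.mem_map.mp hr with ⟨_, _, rfl⟩
      simp [PySem.List.length_pyRange_one]; omega
  -- copy loop
  obtain ⟨hcSh, hcGet⟩ := pvOuter_fold N (fun i j _ => pvGet2 lock2 i j)
    (PySem.List.pyRange N (N+N) 1) (pvNodup_pyRange _ _)
    (by intro i hi; rw [PySem.List.mem_pyRange_one] at hi; omega)
    (PySem.List.pyRange N (N+N) 1) (pvNodup_pyRange _ _)
    (by intro j hj; rw [PySem.List.mem_pyRange_one] at hj; omega)
    _ h0
  -- add loop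
  obtain ⟨haSh, haGet⟩ := pvOuter_fold N (fun i j cur => cur + pvGet2 key (i-x) (j-y))
    (PySem.List.pyRange x (x+M) 1) (pvNodup_pyRange _ _)
    (by intro i hi; rw [PySem.List.mem_pyRange_one] at hi
        have hM : 0 < M := by omega
        obtain ⟨hx, _, hxM, _⟩ := hpk hM
        omega)
    (PySem.List.pyRange y (y+M) 1) (pvNodup_pyRange _ _)
    (by intro j hj; rw [PySem.List.mem_pyRange_one] at hj
        have hM : 0 < M := by omega
        obtain ⟨_, hy, _, hyM, _⟩ := hpk hM
        omega)
    _ hcSh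
  refine pvAll_congr_mem _ _ _ ?_
  intro i hi
  rw [PySem.List.mem_pyRange_one] at hi
  refine pvAll_congr_mem _ _ _ ?_
  intro j hj
  rw [PySem.List.mem_pyRange_one] at hj
  have hi0 : 0 ≤ i := by omega
  have hj0 : 0 ≤ j := by omega
  rw [haGet i j hi0 hj0, hcGet i j hi0 hj0]
  have hcen : i ∈ PySem.List.pyRange N (N+N) 1 ∧ j ∈ PySem.List.pyRange N (N+N) 1 := by
    rw [PySem.List.mem_pyRange_one, PySem.List.mem_pyRange_one]; omega
  rw [if_pos hcen]
  have hmx : i ∈ PySem.List.pyRange x (x+M) 1 ↔ x ≤ i ∧ i < x + M := PySem.List.mem_pyRange_one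
  have hmy : j ∈ PySem.List.pyRange y (y+M) 1 ↔ y ≤ j ∧ j < y + M := PySem.List.mem_pyRange_one
  by_cases hrect : x ≤ i ∧ i < x + M ∧ y ≤ j ∧ j < y + M
  · rw [if_pos ⟨hmx.mpr ⟨hrect.1, hrect.2.1⟩, hmy.mpr ⟨hrect.2.2.1, hrect.2.2.2⟩⟩, if_pos hrect]
  · rw [if_neg (by rw [hmx, hmy]; tauto), if_neg hrect]
    ring_nf
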